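-- pv_equiv track=rewrite | github.com/MrBrantCode/unitest_baseline | mut_generate/mist_train_taco/taco_8629/solution.py | calculate_volume_remainder
-- ===== SOURCE A (Python) =====
-- def calculate_volume_remainder(d, L, s, MOD=10**9 + 7):
--     dp = [0] * (s + 1)
--     dp[s] = 1
--
--     for i in range(d):
--         l = L[i]
--         for j in range(l, s + 1):
--             dp[j - l] -= dp[j]
--
--     ans = 0
--     for i in range(s + 1):
--         ans += pow(i, d, MOD) * dp[i]
--
--     return ans % MOD
-- ===== SOURCE B (Python) =====
-- def calculate_volume_remainder(d, L, s, MOD=10**9 + 7):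
--     # Direct inclusion-exclusion: signed sum over subsets of the d dimensions,
--     # walked with an explicit DFS stack and pruned as soon as the partial
--     # dimension-sum exceeds s.
--     dims = [L[i] for i in range(d)]
--     n = len(dims)
--     total = 0
--     stack = [(0, 0, 1)]
--     while stack:
--         i, t, sign = stack.pop()
--         if t > s:
--             continue
--         if i == n:
--             total += sign * pow(s - t, d, MOD)
--         else:
--             stack.append((i + 1, t, sign))
--             stack.append((i + 1, t + dims[i], -sign))
--     return total % MOD
-- ===== Notes on version B (the rewrite author's own statement) =====
-- stated objective: alternative
-- what changed: B drops A's length-(s+1) knapsack/polynomial DP array and its two scanning passes entirely: it walks the subsets of the d dimensions with an explicit DFS stack (include/exclude each dimension), pruning a branch as soon as the partial dimension-sum exceeds s, and directly accumulates the signed inclusion-exclusion terms (-1)^|S| * pow(s - sum(S), d, MOD).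
import Mathlib
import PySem

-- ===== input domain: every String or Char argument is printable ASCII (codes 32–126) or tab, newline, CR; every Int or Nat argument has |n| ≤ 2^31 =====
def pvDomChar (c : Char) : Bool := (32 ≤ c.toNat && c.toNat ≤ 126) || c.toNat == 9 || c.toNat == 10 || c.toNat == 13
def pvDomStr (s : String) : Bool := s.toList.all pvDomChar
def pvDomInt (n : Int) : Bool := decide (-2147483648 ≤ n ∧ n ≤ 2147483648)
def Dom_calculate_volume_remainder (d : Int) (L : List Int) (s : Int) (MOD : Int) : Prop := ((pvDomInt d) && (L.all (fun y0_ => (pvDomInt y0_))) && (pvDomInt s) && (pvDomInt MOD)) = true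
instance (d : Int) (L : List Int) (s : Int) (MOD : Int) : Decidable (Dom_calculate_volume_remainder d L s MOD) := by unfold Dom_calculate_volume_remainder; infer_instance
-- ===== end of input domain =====

-- B replaces A's length-(s+1) knapsack/polynomial DP array (backward shifts, then an
-- evaluation pass) by an explicit-stack DFS over subsets of the d dimensions, pruned once
-- the partial dimension-sum exceeds s, summing the signed terms: an alternative algorithm.


-- ===== PORT A =====
def calculate_volume_remainder (d : Int) (L : List Int) (s : Int) (MOD : Int) : Int :=
  let dp0 : List Int := PySem.List.pySetD (List.replicate (s + 1).toNat 0) s 1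
  let dp := (PySem.List.pyRange 0 d 1).foldl (fun dp i =>
    let l := PySem.List.pyGetD L i 0
    (PySem.List.pyRange l (s + 1) 1).foldl (fun dp j =>
      PySem.List.pySetD dp (j - l)
        (PySem.List.pyGetD dp (j - l) 0 - PySem.List.pyGetD dp j 0)) dp) dp0
  let ans := (PySem.List.pyRange 0 (s + 1) 1).foldl (fun a i =>
    a + PySem.Int.powMod i d.toNat MOD * PySem.List.pyGetD dp i 0) 0
  PySem.Int.mod ans MOD

-- ===== PORT B =====
-- The DFS stack entry (i, t, sign) indexes into dims; the port carries the remaining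
-- suffix dims[i:] as that traversal state (same values, same order of processing).
def pvLoop (s d MOD : Int) : List (List Int × Int × Int) → Int → Int
  | [], total => total
  | (dims, t, sign) :: rest, total =>
      if s < t then pvLoop s d MOD rest total
      else
        match dims with
        | [] => pvLoop s d MOD rest (total + sign * PySem.Int.powMod (s - t) d.toNat MOD)
        | l :: ds => pvLoop s d MOD ((ds, t + l, -sign) :: (ds, t, sign) :: rest) total
termination_by stack _ => (stack.map (fun e => 3 ^ e.1.length)).sum
decreasing_by
  · simp
  · simp
  · simp [pow_succ]
    have h1 : 1 ≤ 3 ^ ds.length := Nat.one_le_pow _ _ (by omega)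
    omega

def calculate_volume_remainder_alt (d : Int) (L : List Int) (s : Int) (MOD : Int) : Int :=
  PySem.Int.mod (pvLoop s d MOD [((PySem.List.pyRange 0 d 1).map (fun i => PySem.List.pyGetD L i 0), 0, 1)] 0) MOD

-- ===== PRECONDITION & SPEC =====
-- Pre_ excludes exactly the inputs where the Python A raises: s < 0 (IndexError), MOD = 0
-- (ValueError), a negative dimension among L[:d] or d > len(L) (IndexError), and d < 0
-- (ValueError from pow with a negative exponent) except when MOD is 1 or -1, where
-- pow(i, d, MOD) is 0 and A still returns.
def Pre_calculate_volume_remainder (d : Int) (L : List Int) (s : Int) (MOD : Int) : Prop :=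
  0 ≤ s ∧ MOD ≠ 0 ∧
    ((0 ≤ d ∧ d ≤ L.length ∧ (∀ l ∈ L.take d.toNat, 0 ≤ l)) ∨ (d < 0 ∧ (MOD = 1 ∨ MOD = -1)))
instance (d : Int) (L : List Int) (s : Int) (MOD : Int) : Decidable (Pre_calculate_volume_remainder d L s MOD) := by unfold Pre_calculate_volume_remainder; infer_instance
def pvWitness_calculate_volume_remainder : Int × List Int × Int × Int := (2, [2, 3], 6, 1000000007)

def Spec_calculate_volume_remainder (d : Int) (L : List Int) (s : Int) (MOD : Int) (out : Int) : Prop := out = calculate_volume_remainder_alt d L s MOD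
instance (d : Int) (L : List Int) (s : Int) (MOD : Int) (out : Int) : Decidable (Spec_calculate_volume_remainder d L s MOD out) := by unfold Spec_calculate_volume_remainder; infer_instance

-- ===== CLAIM (what is proved, stated in full; the proofs are below) =====
def Claim_equal_calculate_volume_remainder : Prop := ∀ (d : Int) (L : List Int) (s : Int) (MOD : Int), Dom_calculate_volume_remainder d L s MOD → Pre_calculate_volume_remainder d L s MOD → Spec_calculate_volume_remainder d L s MOD (calculate_volume_remainder d L s MOD)

-- ===== LEMMAS AND PROOFS =====

-- recursive reading of the DFS: pvGo dims t sign = what the stack walk adds for one entry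
def pvGo (s d MOD : Int) : List Int → Int → Int → Int
  | [], t, sign => if s < t then 0 else sign * PySem.Int.powMod (s - t) d.toNat MOD
  | l :: rest, t, sign =>
      if s < t then 0 else pvGo s d MOD rest t sign + pvGo s d MOD rest (t + l) (-sign)

theorem pvLoop_go (s d MOD : Int) :
    ∀ (dims : List Int) (t sign : Int) (rest : List (List Int × Int × Int)) (total : Int),
    pvLoop s d MOD ((dims, t, sign) :: rest) total
      = pvLoop s d MOD rest (total + pvGo s d MOD dims t sign) := by
  intro dims
  induction dims with
  | nil =>
    intro t sign rest total
    rw [pvLoop, pvGo]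
    split_ifs with hc
    · rw [add_zero]
    · rfl
  | cons l ds ih =>
    intro t sign rest total
    rw [pvLoop, pvGo]
    split_ifs with hc
    · rw [add_zero]
    · rw [ih (t + l) (-sign), ih t sign]
      congr 1
      ring

-- signed subset-sum count: pvCnt T u = Σ_{S ⊆ T, ΣS = u} (-1)^|S|
def pvCnt : List Int → Int → Int
  | [], u => if u = 0 then 1 else 0
  | l :: T, u => pvCnt T u - pvCnt T (u - l)

theorem pvCnt_neg : ∀ (T : List Int), (∀ x ∈ T, 0 ≤ x) → ∀ u : Int, u < 0 → pvCnt T u = 0 := by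
  intro T
  induction T with
  | nil => intro _ u hu; simp [pvCnt]; omega
  | cons l T ih =>
    intro h u hu
    have hl : 0 ≤ l := h l List.mem_cons_self
    have ht : ∀ x ∈ T, 0 ≤ x := fun x hx => h x (List.mem_cons_of_mem l hx)
    simp [pvCnt, ih ht u hu, ih ht (u - l) (by omega)]

theorem pvCnt_snoc : ∀ (T : List Int) (l u : Int),
    pvCnt (T ++ [l]) u = pvCnt T u - pvCnt T (u - l) := by
  intro T
  induction T with
  | nil => intro l u; simp [pvCnt]
  | cons a T ih =>
    intro l u
    simp only [List.cons_append, pvCnt, ih]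
    rw [show u - a - l = u - l - a from by ring]
    ring

theorem pvTakeFold {β : Type} (f : β → Int → β) (L : List Int) (d : Int) (init : β)
    (h0 : 0 ≤ d) (hd : d ≤ L.length) :
    (PySem.List.pyRange 0 d 1).foldl (fun acc i => f acc (PySem.List.pyGetD L i 0)) init
      = (L.take d.toNat).foldl f init := by
  set T := L.take d.toNat with hT
  have hlen : PySem.List.len T = d := by
    simp [PySem.List.len_eq, hT]
    omega
  conv_lhs => rw [← hlen]
  rw [← PySem.List.foldl_pyRange_zero_pyGetD T 0 f init]
  apply PySem.List.foldl_congr_mem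
  intro acc x hx
  rw [PySem.List.mem_pyRange_one, hlen] at hx
  have hx0 : 0 ≤ x := hx.1
  have hx1 : x < (L.length : Int) := lt_of_lt_of_le hx.2 hd
  rw [PySem.List.pyGetD_eq_getElem L 0 hx0 hx1,
      PySem.List.pyGetD_eq_getElem T 0 hx0 (by have := hlen; simp [PySem.List.len_eq] at this; omega)]
  congr 1
  simp [hT, List.getElem_take]

theorem pvStepA (s l : Int) (hl : 0 ≤ l) :
    ∀ (n : Nat) (m : Int) (dp : List Int), (s + 1 - m).toNat = n → l ≤ m → dp.length = (s+1).toNat →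
    (((PySem.List.pyRange m (s+1) 1).foldl
        (fun dp j => PySem.List.pySetD dp (j - l) (PySem.List.pyGetD dp (j - l) 0 - PySem.List.pyGetD dp j 0)) dp).length = (s+1).toNat
     ∧ ∀ k : Nat, (k:Int) < s + 1 →
        ((PySem.List.pyRange m (s+1) 1).foldl
        (fun dp j => PySem.List.pySetD dp (j - l) (PySem.List.pyGetD dp (j - l) 0 - PySem.List.pyGetD dp j 0)) dp).getD k 0
          = dp.getD k 0 - (if m ≤ (k:Int) + l ∧ (k:Int) + l ≤ s then dp.getD (k + l.toNat) 0 else 0)) := by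
  intro n
  induction n with
  | zero =>
    intro m dp hn hlm hlen
    have hms : s + 1 ≤ m := by omega
    rw [PySem.List.pyRange_one_eq_nil hms]
    refine ⟨hlen, ?_⟩
    intro k hk
    rw [if_neg (by omega)]
    simp
  | succ n ih =>
    intro m dp hn hlm hlen
    have hms : m < s + 1 := by omega
    have hs0 : 0 ≤ s := by omega
    rw [PySem.List.pyRange_one_cons hms, List.foldl_cons]
    have hml0 : (0:Int) ≤ m - l := by omega
    have hmlen : m - l < (dp.length : Int) := by omega
    have hm0 : (0:Int) ≤ m := by omega
    have hmlen' : m < (dp.length : Int) := by omega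
    set v : Int := PySem.List.pyGetD dp (m - l) 0 - PySem.List.pyGetD dp m 0 with hv
    rw [PySem.List.pySetD_of_nonneg dp v hml0]
    set dp1 := dp.set (m - l).toNat v with hdp1
    have hlen1 : dp1.length = (s+1).toNat := by rw [hdp1, List.length_set]; exact hlen
    obtain ⟨ihlen, ihget⟩ := ih (m+1) dp1 (by omega) (by omega) hlen1
    refine ⟨ihlen, ?_⟩
    intro k hk
    rw [ihget k hk]
    have hget1 : ∀ j : Nat, dp1.getD j 0 = if (m - l).toNat = j then v else dp.getD j 0 := by
      intro j
      rw [hdp1, List.getD_eq_getElem?_getD, List.getElem?_set, List.getD_eq_getElem?_getD]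
      split_ifs with h1 h2
      · rfl
      · omega
      · rfl
    rw [hget1 k]
    by_cases hkm : (k:Int) + l = m
    · have hA : (m - l).toNat = k := by omega
      have e2 : m.toNat = k + l.toNat := by omega
      rw [if_pos hA, if_neg (by omega), if_pos (show m ≤ (k:Int) + l ∧ (k:Int) + l ≤ s by omega)]
      rw [hv, PySem.List.pyGetD_eq_getElem dp 0 hml0 hmlen, PySem.List.pyGetD_eq_getElem dp 0 hm0 hmlen']
      simp only [hA, e2]
      rw [List.getD_eq_getElem?_getD, List.getD_eq_getElem?_getD,
          List.getElem?_eq_getElem (by omega), List.getElem?_eq_getElem (by omega)]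
      simp
    · rw [if_neg (by omega)]
      by_cases hcond : m + 1 ≤ (k:Int) + l ∧ (k:Int) + l ≤ s
      · rw [if_pos hcond, if_pos (show m ≤ (k:Int) + l ∧ (k:Int) + l ≤ s by omega)]
        rw [hget1 (k + l.toNat), if_neg (by omega)]
      · rw [if_neg hcond, if_neg (by omega)]

def pvSA (s : Int) (dp : List Int) (l : Int) : List Int :=
  (PySem.List.pyRange l (s + 1) 1).foldl (fun dp j =>
    PySem.List.pySetD dp (j - l) (PySem.List.pyGetD dp (j - l) 0 - PySem.List.pyGetD dp j 0)) dp

-- dp invariant: dp.getD k = pvCnt P (s - k) for the processed prefix P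
theorem pvFoldA (s : Int) :
    ∀ (T P : List Int) (dp : List Int), (∀ x ∈ T, 0 ≤ x) → (∀ x ∈ P, 0 ≤ x) →
    dp.length = (s + 1).toNat → (∀ k : Nat, (k:Int) < s + 1 → dp.getD k 0 = pvCnt P (s - k)) →
    ((T.foldl (pvSA s) dp).length = (s + 1).toNat ∧
     ∀ k : Nat, (k:Int) < s + 1 → (T.foldl (pvSA s) dp).getD k 0 = pvCnt (P ++ T) (s - k)) := by
  intro T
  induction T with
  | nil =>
    intro P dp _ _ hlen hinv
    simp only [List.foldl_nil, List.append_nil]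
    exact ⟨hlen, hinv⟩
  | cons l T ih =>
    intro P dp hT hP hlen hinv
    have hl : 0 ≤ l := hT l List.mem_cons_self
    obtain ⟨hlen1, hget1⟩ := pvStepA s l hl (s + 1 - l).toNat l dp rfl le_rfl hlen
    rw [List.foldl_cons]
    have hPl : ∀ x ∈ P ++ [l], 0 ≤ x := by
      intro x hx
      rcases List.mem_append.mp hx with h | h
      · exact hP x h
      · simp at h; omega
    have hinv1 : ∀ k : Nat, (k:Int) < s + 1 → (pvSA s dp l).getD k 0 = pvCnt (P ++ [l]) (s - k) := by
      intro k hk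
      rw [show pvSA s dp l = (PySem.List.pyRange l (s + 1) 1).foldl
          (fun dp j => PySem.List.pySetD dp (j - l) (PySem.List.pyGetD dp (j - l) 0 - PySem.List.pyGetD dp j 0)) dp from rfl]
      rw [hget1 k hk, pvCnt_snoc, hinv k hk]
      congr 1
      by_cases hc : (k:Int) + l ≤ s
      · rw [if_pos ⟨by omega, hc⟩, hinv (k + l.toNat) (by omega)]
        congr 1
        omega
      · rw [if_neg (by omega), pvCnt_neg P hP (s - k - l) (by omega)]
    have := ih (P ++ [l]) (pvSA s dp l) (fun x hx => hT x (List.mem_cons_of_mem l hx)) hPl hlen1 hinv1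
    simpa using this

-- shift lemma for the subset-sum evaluation
theorem pvShift (s d MOD : Int) (T : List Int) (hT : ∀ x ∈ T, 0 ≤ x) (t l : Int)
    (hl : 0 ≤ l) (hts : t ≤ s) :
    (∑ k ∈ Finset.range (s + 1 - t).toNat, pvCnt T ((k:Int) - l) * PySem.Int.powMod (s - t - k) d.toNat MOD)
      = ∑ k ∈ Finset.range (s + 1 - (t + l)).toNat, pvCnt T (k:Int) * PySem.Int.powMod (s - (t + l) - k) d.toNat MOD := by
  by_cases hc : t + l ≤ s
  · have hsplit : (s + 1 - t).toNat = l.toNat + (s + 1 - (t + l)).toNat := by omega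
    rw [hsplit, Finset.sum_range_add]
    have h1 : (∑ k ∈ Finset.range l.toNat, pvCnt T ((k:Int) - l) * PySem.Int.powMod (s - t - k) d.toNat MOD) = 0 := by
      apply Finset.sum_eq_zero
      intro k hk
      rw [Finset.mem_range] at hk
      rw [pvCnt_neg T hT ((k:Int) - l) (by omega), zero_mul]
    rw [h1, zero_add]
    apply Finset.sum_congr rfl
    intro k _
    have e1 : ((l.toNat + k : Nat) : Int) - l = (k:Int) := by push_cast; omega
    have e2 : s - t - ((l.toNat + k : Nat) : Int) = s - (t + l) - (k:Int) := by push_cast; omega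
    rw [e1, e2]
  · have h0 : (s + 1 - (t + l)).toNat = 0 := by omega
    rw [h0]
    simp only [Finset.range_zero, Finset.sum_empty]
    apply Finset.sum_eq_zero
    intro k hk
    rw [Finset.mem_range] at hk
    rw [pvCnt_neg T hT ((k:Int) - l) (by omega), zero_mul]

-- pvGo evaluated as a weighted sum of signed subset-sum counts
theorem pvGo_eq (s d MOD : Int) :
    ∀ (T : List Int), (∀ x ∈ T, 0 ≤ x) → ∀ (t sign : Int),
    pvGo s d MOD T t sign
      = sign * ∑ k ∈ Finset.range (s + 1 - t).toNat, pvCnt T (k:Int) * PySem.Int.powMod (s - t - k) d.toNat MOD := by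
  intro T
  induction T with
  | nil =>
    intro _ t sign
    by_cases hts : s < t
    · rw [pvGo, if_pos hts, show (s + 1 - t).toNat = 0 by omega]
      simp
    · rw [pvGo, if_neg hts]
      have hn : (s + 1 - t).toNat = 1 + (s - t).toNat := by omega
      rw [hn, Finset.sum_range_add]
      have h1 : (∑ k ∈ Finset.range 1, pvCnt [] (k:Int) * PySem.Int.powMod (s - t - k) d.toNat MOD)
          = PySem.Int.powMod (s - t) d.toNat MOD := by
        simp [pvCnt]
      have h2 : (∑ k ∈ Finset.range (s - t).toNat, pvCnt [] ((1 + k : Nat) : Int) * PySem.Int.powMod (s - t - ((1 + k : Nat) : Int)) d.toNat MOD) = 0 := by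
        apply Finset.sum_eq_zero
        intro k _
        have hne : ((1 + k : Nat) : Int) ≠ 0 := by push_cast; omega
        rw [show pvCnt [] ((1 + k : Nat) : Int) = 0 from by rw [pvCnt]; exact if_neg hne, zero_mul]
      rw [h1, h2, add_zero]
  | cons l T ih =>
    intro h t sign
    have hl : 0 ≤ l := h l List.mem_cons_self
    have hT : ∀ x ∈ T, 0 ≤ x := fun x hx => h x (List.mem_cons_of_mem l hx)
    by_cases hts : s < t
    · rw [pvGo, if_pos hts, show (s + 1 - t).toNat = 0 by omega]
      simp
    · rw [pvGo, if_neg hts, ih hT t sign, ih hT (t + l) (-sign),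
          ← pvShift s d MOD T hT t l hl (by omega)]
      have hsum : (∑ k ∈ Finset.range (s + 1 - t).toNat, pvCnt (l :: T) (k:Int) * PySem.Int.powMod (s - t - k) d.toNat MOD)
          = (∑ k ∈ Finset.range (s + 1 - t).toNat, pvCnt T (k:Int) * PySem.Int.powMod (s - t - k) d.toNat MOD)
            - ∑ k ∈ Finset.range (s + 1 - t).toNat, pvCnt T ((k:Int) - l) * PySem.Int.powMod (s - t - k) d.toNat MOD := by
        rw [← Finset.sum_sub_distrib]
        apply Finset.sum_congr rfl
        intro k _
        rw [pvCnt]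
        ring
      rw [hsum]
      ring

-- A's evaluation pass as the same weighted sum
theorem pvFinalA (s d MOD : Int) (hs : 0 ≤ s) (dp : List Int) (c : Int → Int)
    (hinv : ∀ k : Nat, (k:Int) < s + 1 → dp.getD k 0 = c (s - k)) :
    (PySem.List.pyRange 0 (s + 1) 1).foldl (fun a i =>
        a + PySem.Int.powMod i d.toNat MOD * PySem.List.pyGetD dp i 0) 0
      = ∑ k ∈ Finset.range (s + 1).toNat, c (k:Int) * PySem.Int.powMod (s - k) d.toNat MOD := by
  rw [PySem.List.foldl_add _ (fun i => PySem.Int.powMod i d.toNat MOD * PySem.List.pyGetD dp i 0) 0]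
  rw [PySem.List.pyRange_one, List.map_map]
  set n := (s + 1 - 0).toNat with hn
  have hnn : n = (s + 1).toNat := by omega
  show 0 + (∑ i ∈ Finset.range n, PySem.Int.powMod (0 + (i:Int)) d.toNat MOD * PySem.List.pyGetD dp (0 + (i:Int)) 0) = _
  rw [zero_add, hnn]
  rw [← Finset.sum_range_reflect (fun k => c (k:Int) * PySem.Int.powMod (s - k) d.toNat MOD) (s + 1).toNat]
  apply Finset.sum_congr rfl
  intro i hi
  rw [Finset.mem_range] at hi
  have hcast : (((s + 1).toNat - 1 - i : Nat) : Int) = s - i := by omega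
  rw [hcast]
  rw [show (0:Int) + (i:Int) = (i:Int) by ring, PySem.List.pyGetD_natCast]
  rw [hinv i (by omega)]
  rw [show s - (s - (i:Int)) = (i:Int) by ring]
  ring

theorem pvInit (s : Int) (hs : 0 ≤ s) :
    (PySem.List.pySetD (List.replicate (s + 1).toNat (0:Int)) s 1).length = (s + 1).toNat ∧
    ∀ k : Nat, (k:Int) < s + 1 →
      (PySem.List.pySetD (List.replicate (s + 1).toNat (0:Int)) s 1).getD k 0 = pvCnt [] (s - k) := by
  rw [PySem.List.pySetD_of_nonneg _ _ hs]
  constructor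
  · simp
  · intro k hk
    rw [List.getD_eq_getElem?_getD, List.getElem?_set]
    by_cases hks : s.toNat = k
    · rw [if_pos hks, if_pos (by simp; omega)]
      simp [pvCnt]
      omega
    · rw [if_neg hks, List.getElem?_replicate, if_pos (by omega)]
      simp [pvCnt]
      omega

theorem pvTakeMap (L : List Int) (d : Int) (h0 : 0 ≤ d) (hd : d ≤ L.length) :
    (PySem.List.pyRange 0 d 1).map (fun i => PySem.List.pyGetD L i 0) = L.take d.toNat := by
  set T := L.take d.toNat with hT
  have hlen : PySem.List.len T = d := by
    simp [PySem.List.len_eq, hT]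
    omega
  have hmap : (PySem.List.pyRange 0 (PySem.List.len T) 1).map (fun i => PySem.List.pyGetD L i 0)
      = (PySem.List.pyRange 0 (PySem.List.len T) 1).map (fun j => PySem.List.pyGetD T j 0) := by
    apply List.map_congr_left
    intro x hx
    rw [PySem.List.mem_pyRange_one, hlen] at hx
    have hx0 : 0 ≤ x := hx.1
    have hx1 : x < (L.length : Int) := lt_of_lt_of_le hx.2 hd
    rw [PySem.List.pyGetD_eq_getElem L 0 hx0 hx1,
        PySem.List.pyGetD_eq_getElem T 0 hx0 (by have := hlen; simp [PySem.List.len_eq] at this; omega)]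
    simp [hT, List.getElem_take]
  rw [← hlen, hmap, PySem.List.map_pyGetD_pyRange_zero T 0]

theorem pvMain (d : Int) (L : List Int) (s : Int) (MOD : Int)
    (hd0 : 0 ≤ d) (hdl : d ≤ L.length) (hs : 0 ≤ s)
    (hpos : ∀ l ∈ L.take d.toNat, 0 ≤ l) :
    calculate_volume_remainder d L s MOD = calculate_volume_remainder_alt d L s MOD := by
  set T := L.take d.toNat with hT
  obtain ⟨hlen0, hinv0⟩ := pvInit s hs
  obtain ⟨_, hinvT⟩ := pvFoldA s T [] _ hpos (by simp) hlen0 hinv0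
  simp only [List.nil_append] at hinvT
  have eA : calculate_volume_remainder d L s MOD
      = PySem.Int.mod (∑ k ∈ Finset.range (s + 1).toNat, pvCnt T (k:Int) * PySem.Int.powMod (s - k) d.toNat MOD) MOD := by
    show PySem.Int.mod ((PySem.List.pyRange 0 (s + 1) 1).foldl (fun a i =>
          a + PySem.Int.powMod i d.toNat MOD * PySem.List.pyGetD
            ((PySem.List.pyRange 0 d 1).foldl (fun acc i => pvSA s acc (PySem.List.pyGetD L i 0))
              (PySem.List.pySetD (List.replicate (s + 1).toNat 0) s 1)) i 0) 0) MOD = _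
    rw [pvTakeFold (pvSA s) L d _ hd0 hdl]
    congr 1
    exact pvFinalA s d MOD hs _ (pvCnt T) hinvT
  have eB : calculate_volume_remainder_alt d L s MOD
      = PySem.Int.mod (∑ k ∈ Finset.range (s + 1).toNat, pvCnt T (k:Int) * PySem.Int.powMod (s - k) d.toNat MOD) MOD := by
    unfold calculate_volume_remainder_alt
    rw [pvTakeMap L d hd0 hdl, ← hT, pvLoop_go, pvLoop, zero_add,
        pvGo_eq s d MOD T hpos 0 1, one_mul]
    congr 1
    apply Finset.sum_congr (by congr 1; omega)
    intro k _
    congr 2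
    omega
  rw [eA, eB]

theorem pvGoZero (s d MOD : Int) (h : ∀ x : Int, PySem.Int.powMod x d.toNat MOD = 0) :
    ∀ (T : List Int) (t sign : Int), pvGo s d MOD T t sign = 0 := by
  intro T
  induction T with
  | nil =>
    intro t sign
    rw [pvGo]
    split_ifs with hc
    · rfl
    · rw [h]
      ring
  | cons l T ih =>
    intro t sign
    rw [pvGo]
    split_ifs with hc
    · rfl
    · rw [ih, ih]
      ring

theorem pvFoldlId : ∀ (r : List Int) (a : Int), r.foldl (fun a (_ : Int) => a) a = a := by
  intro r
  induction r with
  | nil => intro a; rfl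
  | cons x r ih => intro a; rw [List.foldl_cons]; exact ih a

theorem pvDegenerate (d : Int) (L : List Int) (s : Int) (MOD : Int)
    (hd : d < 0) (hM : MOD = 1 ∨ MOD = -1) :
    calculate_volume_remainder d L s MOD = calculate_volume_remainder_alt d L s MOD := by
  have hd0 : d.toNat = 0 := by omega
  have hpow : ∀ x : Int, PySem.Int.powMod x d.toNat MOD = 0 := by
    intro x
    rw [hd0]
    rcases hM with h | h <;> (subst h; simp [PySem.Int.powMod, pow_zero]; try decide)
  unfold calculate_volume_remainder calculate_volume_remainder_alt
  have hr : PySem.List.pyRange 0 d 1 = [] := PySem.List.pyRange_one_eq_nil (by omega)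
  rw [pvLoop_go, pvLoop, zero_add, pvGoZero s d MOD hpow]
  simp only [hr, List.foldl_nil, hpow, zero_mul, add_zero]
  rw [pvFoldlId]

-- ===== VERDICT (by name: the statement is the Claim_ definition above) =====
theorem calculate_volume_remainder_spec : Claim_equal_calculate_volume_remainder := by
  intro d L s MOD hdom hpre
  obtain ⟨hs, hM0, hcase⟩ := hpre
  unfold Spec_calculate_volume_remainder
  rcases hcase with ⟨hd0, hdl, hpos⟩ | ⟨hd, hM⟩
  · exact pvMain d L s MOD hd0 hdl hs hpos
  · exact pvDegenerate d L s MOD hd hM
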